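-- pv_equiv track=rewrite | github.com/Edwarika3224/Advent-of-Code-2020 | day21.py | part1
-- ===== SOURCE A (Python) =====
-- def part1(file):
--     allergens = get_names(file)
--     bad = allergens.values()
--     strings = []
--     for entry in bad:
--         for str1 in entry:
--             strings.append(str1)
--     safe_count = 0
--     for food in file:
--         for ingredient in food[0]:
--             if ingredient not in strings:
--                 safe_count+=1
--     return safe_count
--
-- def get_names(array = [()]):
--     allergens = [] #list of all allergens
--     for food in array:
--         for alg in food[1]:
--             if alg not in allergens:
--                 allergens.append(alg)
--
--     alg_map = {}
--     for alg in allergens: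
--         possible = [] #list of possible ingredients
--         for food in array:
--             if alg in food[1]:
--                 possible = common(food[0],possible)
--         alg_map[alg] = possible
--
--     return alg_map
--
-- def common(list1 = [], list2 = []):
--     if list2 == []:
--         return list1
--     same = []
--     for ingredient in list2:
--         if ingredient in list1:
--             same.append(ingredient)
--     return same
-- ===== SOURCE B (Python) =====
-- def part1(file):
--     # One pass over the foods: maintain a dict allergen -> current candidate
--     # ingredient list, then count safe ingredient occurrences via a set.
--     possible = {}
--     for food in file:
--         for alg in set(food[1]):
--             cur = possible.get(alg, [])
--             if not cur:
--                 possible[alg] = food[0]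
--             else:
--                 possible[alg] = [ing for ing in cur if ing in food[0]]
--     bad = set()
--     for entry in possible.values():
--         bad.update(entry)
--     safe_count = 0
--     for food in file:
--         for ingredient in food[0]:
--             if ingredient not in bad:
--                 safe_count += 1
--     return safe_count
-- ===== Notes on version B (the rewrite author's own statement) =====
-- stated objective: faster
-- what changed: B replaces A's two-phase search (collect allergens, then for each allergen rescan the whole food list with list intersections, then test each ingredient against a flat candidate list by linear scan) with a single pass over the foods that maintains a dict from allergen to its current candidate list, and a set for the final membership test.
import Mathlib
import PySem

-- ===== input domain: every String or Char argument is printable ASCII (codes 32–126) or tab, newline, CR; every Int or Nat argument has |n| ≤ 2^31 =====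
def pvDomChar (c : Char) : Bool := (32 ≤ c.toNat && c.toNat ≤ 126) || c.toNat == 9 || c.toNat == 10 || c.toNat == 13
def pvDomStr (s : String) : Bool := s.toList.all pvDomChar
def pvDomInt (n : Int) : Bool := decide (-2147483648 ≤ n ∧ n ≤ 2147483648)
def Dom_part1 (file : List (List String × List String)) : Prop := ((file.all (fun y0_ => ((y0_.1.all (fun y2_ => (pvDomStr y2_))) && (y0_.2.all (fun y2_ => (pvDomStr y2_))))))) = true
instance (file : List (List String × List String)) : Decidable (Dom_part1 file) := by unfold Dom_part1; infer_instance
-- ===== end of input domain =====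

-- B replaces A's two-phase search (per-allergen rescans of the whole food list, then
-- linear 'in strings' scans) with a single pass over the foods maintaining a dict of
-- candidate lists, and a set for the final membership test.

-- ===== PORT A =====
def common (list1 : List String) (list2 : List String) : List String :=
  if list2 = [] then list1
  else list2.foldl (fun same ingredient =>
    if ingredient ∈ list1 then same ++ [ingredient] else same) []

def get_names (array : List (List String × List String)) : PySem.Dict String (List String) :=
  (array.foldl (fun acc food =>
    food.2.foldl (fun acc alg => if alg ∈ acc then acc else acc ++ [alg]) acc) []).foldl
  (fun alg_map alg =>
    alg_map.insert alg (array.foldl (fun possible food =>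
      if alg ∈ food.2 then common food.1 possible else possible) [])) PySem.Dict.empty

def part1 (file : List (List String × List String)) : Int :=
  let allergens := get_names file
  let strings : List String := allergens.values.foldl (fun strings entry =>
    entry.foldl (fun strings str1 => strings ++ [str1]) strings) []
  file.foldl (fun safe_count food =>
    food.1.foldl (fun safe_count ingredient =>
      if ingredient ∈ strings then safe_count else safe_count + 1) safe_count) 0

-- ===== PORT B =====
def part1_alt (file : List (List String × List String)) : Int :=
  let possible : PySem.Dict String (List String) :=
    file.foldl (fun possible food =>
      (PySem.Set.ofList food.2).foldl (fun possible alg =>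
        let cur := possible.getD alg []
        if cur = [] then possible.insert alg food.1
        else possible.insert alg (cur.filter (fun ing => decide (ing ∈ food.1)))) possible)
      PySem.Dict.empty
  let bad : PySem.Set String :=
    possible.values.foldl (fun bad entry => PySem.Set.update bad entry) PySem.Set.empty
  file.foldl (fun safe_count food =>
    food.1.foldl (fun safe_count ingredient =>
      if ingredient ∈ bad then safe_count else safe_count + 1) safe_count) 0

-- ===== PRECONDITION & SPEC =====
def Spec_part1 (file : List (List String × List String)) (out : Int) : Prop := out = part1_alt file
instance (file : List (List String × List String)) (out : Int) : Decidable (Spec_part1 file out) := by unfold Spec_part1; infer_instance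

-- ===== CLAIM (what is proved, stated in full; the proofs are below) =====
def Claim_equal_part1 : Prop := ∀ (file : List (List String × List String)), Dom_part1 file → Spec_part1 file (part1 file)

-- ===== LEMMAS AND PROOFS =====

-- the per-allergen candidate computation that both programs perform, as one fold
def candStep (poss : List String) (food : List String × List String) : List String :=
  if poss = [] then food.1 else poss.filter (fun ing => decide (ing ∈ food.1))

def candFold (file : List (List String × List String)) (a : String) : List String :=
  file.foldl (fun poss food => if a ∈ food.2 then candStep poss food else poss) []

-- L1: A's helper `common` is candStep with its arguments packaged
theorem common_eq_candStep (food : List String × List String) (l2 : List String) :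
    common food.1 l2 = candStep l2 food := by
  unfold common candStep
  by_cases h : l2 = [] <;> simp [h, PySem.List.foldl_append_ite_eq_filter]

-- L2: A's per-allergen inner fold is candFold
theorem a_value_eq_candFold (file : List (List String × List String)) (a : String) :
    file.foldl (fun possible food =>
      if a ∈ food.2 then common food.1 possible else possible) [] = candFold file a := by
  unfold candFold
  apply PySem.List.foldl_congr_mem
  intro acc x _
  by_cases h : a ∈ x.2 <;> simp [h, common_eq_candStep x acc]

-- L3: membership and nodup of A's allergen list
theorem mem_dedup_inner (l : List String) (acc : List String) (a : String) :
    a ∈ l.foldl (fun acc alg => if alg ∈ acc then acc else acc ++ [alg]) acc ↔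
      a ∈ acc ∨ a ∈ l := by
  induction l generalizing acc with
  | nil => simp
  | cons x xs ih =>
    simp only [List.foldl_cons, ih]
    by_cases h : x ∈ acc <;> by_cases hax : a = x <;> simp [h, hax]

theorem nodup_dedup_inner (l : List String) (acc : List String) (h : acc.Nodup) :
    (l.foldl (fun acc alg => if alg ∈ acc then acc else acc ++ [alg]) acc).Nodup := by
  induction l generalizing acc with
  | nil => simpa
  | cons x xs ih =>
    simp only [List.foldl_cons]
    by_cases hx : x ∈ acc
    · simpa [hx] using ih acc h
    · simp only [hx, if_false]
      exact ih _ (by simp [List.nodup_append, h]; exact fun a ha hax => hx (hax ▸ ha))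

def allergensOf (file : List (List String × List String)) : List String :=
  file.foldl (fun acc food =>
    food.2.foldl (fun acc alg => if alg ∈ acc then acc else acc ++ [alg]) acc) []

theorem mem_allergensOf (file : List (List String × List String)) (a : String) :
    a ∈ allergensOf file ↔ ∃ food ∈ file, a ∈ food.2 := by
  unfold allergensOf
  suffices h : ∀ acc, a ∈ file.foldl (fun acc food =>
      food.2.foldl (fun acc alg => if alg ∈ acc then acc else acc ++ [alg]) acc) acc ↔
      a ∈ acc ∨ ∃ food ∈ file, a ∈ food.2 by simpa using h []
  induction file with
  | nil => simp
  | cons f fs ih =>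
    intro acc
    simp only [List.foldl_cons, ih, mem_dedup_inner]
    constructor
    · rintro ((h | h) | ⟨g, hg, hag⟩)
      · exact Or.inl h
      · exact Or.inr ⟨f, by simp, h⟩
      · exact Or.inr ⟨g, by simp [hg], hag⟩
    · rintro (h | ⟨g, hg, hag⟩)
      · exact Or.inl (Or.inl h)
      · rcases List.mem_cons.mp hg with rfl | hg'
        · exact Or.inl (Or.inr hag)
        · exact Or.inr ⟨g, hg', hag⟩

theorem nodup_allergensOf (file : List (List String × List String)) :
    (allergensOf file).Nodup := by
  unfold allergensOf
  suffices h : ∀ acc : List String, acc.Nodup → (file.foldl (fun acc food =>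
      food.2.foldl (fun acc alg => if alg ∈ acc then acc else acc ++ [alg]) acc) acc).Nodup by
    exact h [] (by simp)
  induction file with
  | nil => intro acc h; simpa
  | cons f fs ih =>
    intro acc h
    exact ih _ (nodup_dedup_inner _ _ h)

-- L6: membership in A's flattened `strings`
theorem mem_strings (file : List (List String × List String)) (s : String) :
    s ∈ (get_names file).values.foldl (fun strings entry =>
        entry.foldl (fun strings str1 => strings ++ [str1]) strings) [] ↔
      ∃ a ∈ allergensOf file, s ∈ candFold file a := by
  have hsing : ∀ (e acc : List String), e.foldl (fun strings str1 => strings ++ [str1]) acc = acc ++ e := by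
    intro e
    induction e with
    | nil => simp
    | cons x xs ih => intro acc; simp [ih]
  have hflat : ∀ (ls : List (List String)) (acc : List String),
      ls.foldl (fun strings entry =>
        entry.foldl (fun strings str1 => strings ++ [str1]) strings) acc = acc ++ ls.flatten := by
    intro ls
    induction ls with
    | nil => simp
    | cons e es ih =>
      intro acc
      rw [List.foldl_cons, hsing e acc, ih]
      simp
  have h1 : get_names file = (allergensOf file).foldl
      (fun alg_map alg => alg_map.insert alg (candFold file alg)) PySem.Dict.empty := by
    unfold get_names allergensOf
    apply PySem.List.foldl_congr_mem
    intro acc x _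
    rw [a_value_eq_candFold]
  have hitems : (get_names file).items =
      (allergensOf file).map (fun a => (a, candFold file a)) := by
    rw [h1]
    have := PySem.Dict.items_foldl_insert_fresh (l := allergensOf file)
      (k := fun a => a) (v := fun a => candFold file a) (d := PySem.Dict.empty)
      (by intro a _; simp [PySem.Dict.contains_empty])
      (by simpa using nodup_allergensOf file)
    simpa using this
  have hvals : (get_names file).values =
      (allergensOf file).map (fun a => candFold file a) := by
    simp [PySem.Dict.values, hitems]
  rw [hvals, hflat]
  simp [List.mem_flatten]

-- L7: pointwise value of B's dict
theorem inner_getD_of_not_mem (food : List String × List String)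
    (l : List String) (d : PySem.Dict String (List String)) (a : String) (ha : a ∉ l) :
    (l.foldl (fun possible alg =>
      let cur := possible.getD alg []
      if cur = [] then possible.insert alg food.1
      else possible.insert alg (cur.filter (fun ing => decide (ing ∈ food.1)))) d).getD a [] =
    d.getD a [] := by
  induction l generalizing d with
  | nil => rfl
  | cons x xs ih =>
    simp only [List.foldl_cons]
    have hax : a ≠ x := by rintro rfl; exact ha (by simp)
    have hxs : a ∉ xs := fun h => ha (by simp [h])
    rw [ih _ hxs]
    by_cases h : d.getD x [] = [] <;>
      simp [h, PySem.Dict.getD_insert, hax]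

theorem inner_getD (food : List String × List String)
    (l : List String) (hl : l.Nodup) (d : PySem.Dict String (List String)) (a : String) :
    (l.foldl (fun possible alg =>
      let cur := possible.getD alg []
      if cur = [] then possible.insert alg food.1
      else possible.insert alg (cur.filter (fun ing => decide (ing ∈ food.1)))) d).getD a [] =
    if a ∈ l then candStep (d.getD a []) food else d.getD a [] := by
  induction l generalizing d with
  | nil => simp
  | cons x xs ih =>
    simp only [List.foldl_cons]
    rcases List.nodup_cons.mp hl with ⟨hx, hxs⟩
    by_cases hax : a = x
    · subst hax
      have step : ((let cur := d.getD a []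
          if cur = [] then d.insert a food.1
          else d.insert a (cur.filter (fun ing => decide (ing ∈ food.1)))) : PySem.Dict String (List String)).getD a [] =
          candStep (d.getD a []) food := by
        by_cases h : d.getD a [] = [] <;> simp [h, candStep]
      rw [inner_getD_of_not_mem food xs _ a hx, step]
      simp
    · by_cases hmem : a ∈ xs
      · rw [ih hxs]
        have step : ((let cur := d.getD x []
            if cur = [] then d.insert x food.1
            else d.insert x (cur.filter (fun ing => decide (ing ∈ food.1)))) : PySem.Dict String (List String)).getD a [] =
            d.getD a [] := by
          by_cases h : d.getD x [] = [] <;> simp [h, PySem.Dict.getD_insert, hax]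
        simp [hmem, step, hax]
      · rw [ih hxs]
        have step : ((let cur := d.getD x []
            if cur = [] then d.insert x food.1
            else d.insert x (cur.filter (fun ing => decide (ing ∈ food.1)))) : PySem.Dict String (List String)).getD a [] =
            d.getD a [] := by
          by_cases h : d.getD x [] = [] <;> simp [h, PySem.Dict.getD_insert, hax]
        simp [hmem, hax, step]

def possibleOf (file : List (List String × List String)) : PySem.Dict String (List String) :=
  file.foldl (fun possible food =>
    (PySem.Set.ofList food.2).foldl (fun possible alg =>
      let cur := possible.getD alg []
      if cur = [] then possible.insert alg food.1
      else possible.insert alg (cur.filter (fun ing => decide (ing ∈ food.1)))) possible)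
    PySem.Dict.empty

theorem possible_getD (file : List (List String × List String)) (a : String) :
    (possibleOf file).getD a [] = candFold file a := by
  unfold possibleOf candFold
  suffices h : ∀ d : PySem.Dict String (List String),
      (file.foldl (fun possible food =>
        (PySem.Set.ofList food.2).foldl (fun possible alg =>
          let cur := possible.getD alg []
          if cur = [] then possible.insert alg food.1
          else possible.insert alg (cur.filter (fun ing => decide (ing ∈ food.1)))) possible)
        d).getD a [] =
      file.foldl (fun poss food => if a ∈ food.2 then candStep poss food else poss) (d.getD a []) by
    simpa using h PySem.Dict.empty
  induction file with
  | nil => intro d; rfl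
  | cons f fs ih =>
    intro d
    simp only [List.foldl_cons]
    rw [ih, inner_getD f _ (PySem.Set.nodup_ofList f.2) d a]
    simp [PySem.Set.mem_ofList]

-- L8: keys of B's dict
theorem inner_keys (food : List String × List String)
    (l : List String) (d : PySem.Dict String (List String)) (a : String) :
    a ∈ (l.foldl (fun possible alg =>
      let cur := possible.getD alg []
      if cur = [] then possible.insert alg food.1
      else possible.insert alg (cur.filter (fun ing => decide (ing ∈ food.1)))) d).keys ↔
    a ∈ d.keys ∨ a ∈ l := by
  induction l generalizing d with
  | nil => simp
  | cons x xs ih =>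
    simp only [List.foldl_cons]
    rw [ih]
    by_cases h : d.getD x [] = [] <;>
      simp [h, PySem.Dict.mem_keys_insert] <;> tauto

theorem inner_keys_nodup (food : List String × List String)
    (l : List String) (d : PySem.Dict String (List String)) (hd : d.keys.Nodup) :
    (l.foldl (fun possible alg =>
      let cur := possible.getD alg []
      if cur = [] then possible.insert alg food.1
      else possible.insert alg (cur.filter (fun ing => decide (ing ∈ food.1)))) d).keys.Nodup := by
  induction l generalizing d with
  | nil => simpa
  | cons x xs ih =>
    simp only [List.foldl_cons]
    by_cases h : d.getD x [] = []
    · simp only [h]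
      exact ih _ (PySem.Dict.nodup_keys_insert _ _ _ hd)
    · simp only [if_neg h]
      exact ih _ (PySem.Dict.nodup_keys_insert _ _ _ hd)

theorem mem_keys_possibleOf (file : List (List String × List String)) (a : String) :
    a ∈ (possibleOf file).keys ↔ ∃ food ∈ file, a ∈ food.2 := by
  unfold possibleOf
  suffices h : ∀ d : PySem.Dict String (List String),
      a ∈ (file.foldl (fun possible food =>
        (PySem.Set.ofList food.2).foldl (fun possible alg =>
          let cur := possible.getD alg []
          if cur = [] then possible.insert alg food.1
          else possible.insert alg (cur.filter (fun ing => decide (ing ∈ food.1)))) possible)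
        d).keys ↔ a ∈ d.keys ∨ ∃ food ∈ file, a ∈ food.2 by
    simpa [PySem.Dict.keys_empty] using h PySem.Dict.empty
  induction file with
  | nil => simp
  | cons f fs ih =>
    intro d
    rw [List.foldl_cons, ih, inner_keys f _ d a]
    simp only [PySem.Set.mem_ofList, List.mem_cons]
    constructor
    · rintro ((h | h) | ⟨g, hg, hag⟩)
      · exact Or.inl h
      · exact Or.inr ⟨f, Or.inl rfl, h⟩
      · exact Or.inr ⟨g, Or.inr hg, hag⟩
    · rintro (h | ⟨g, (rfl | hg), hag⟩)
      · exact Or.inl (Or.inl h)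
      · exact Or.inl (Or.inr hag)
      · exact Or.inr ⟨g, hg, hag⟩

theorem nodup_keys_possibleOf (file : List (List String × List String)) :
    (possibleOf file).keys.Nodup := by
  unfold possibleOf
  suffices h : ∀ d : PySem.Dict String (List String), d.keys.Nodup →
      (file.foldl (fun possible food =>
        (PySem.Set.ofList food.2).foldl (fun possible alg =>
          let cur := possible.getD alg []
          if cur = [] then possible.insert alg food.1
          else possible.insert alg (cur.filter (fun ing => decide (ing ∈ food.1)))) possible)
        d).keys.Nodup by
    exact h PySem.Dict.empty (by simp [PySem.Dict.keys_empty])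
  induction file with
  | nil => intro d h; simpa
  | cons f fs ih =>
    intro d h
    exact ih _ (inner_keys_nodup f _ d h)

-- L9: membership in B's bad set
theorem mem_bad (ls : List (List String)) (s0 : PySem.Set String) (x : String) :
    x ∈ ls.foldl (fun bad entry => PySem.Set.update bad entry) s0 ↔
      x ∈ s0 ∨ ∃ e ∈ ls, x ∈ e := by
  induction ls generalizing s0 with
  | nil => simp
  | cons e es ih =>
    simp only [List.foldl_cons, ih, PySem.Set.mem_update]
    constructor
    · rintro ((h | h) | ⟨e', he', hx⟩)
      · exact Or.inl h
      · exact Or.inr ⟨e, by simp, h⟩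
      · exact Or.inr ⟨e', by simp [he'], hx⟩
    · rintro (h | ⟨e', he', hx⟩)
      · exact Or.inl (Or.inl h)
      · rcases List.mem_cons.mp he' with rfl | h'
        · exact Or.inl (Or.inr hx)
        · exact Or.inr ⟨e', h', hx⟩

-- L10: the two counting loops agree when the membership predicates agree
theorem count_congr (file : List (List String × List String))
    (strings bad : List String) (h : ∀ x, x ∈ strings ↔ x ∈ bad) (c : Int) :
    file.foldl (fun safe_count food =>
      food.1.foldl (fun safe_count ingredient =>
        if ingredient ∈ strings then safe_count else safe_count + 1) safe_count) c =
    file.foldl (fun safe_count food =>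
      food.1.foldl (fun safe_count ingredient =>
        if ingredient ∈ bad then safe_count else safe_count + 1) safe_count) c := by
  induction file generalizing c with
  | nil => rfl
  | cons f fs ih =>
    simp only [List.foldl_cons]
    rw [show (f.1.foldl (fun safe_count ingredient =>
        if ingredient ∈ strings then safe_count else safe_count + 1) c) =
      (f.1.foldl (fun safe_count ingredient =>
        if ingredient ∈ bad then safe_count else safe_count + 1) c) from ?_]
    · exact ih _
    · induction f.1 generalizing c with
      | nil => rfl
      | cons i is ih2 =>
        simp only [List.foldl_cons]
        by_cases hi : i ∈ strings
        · rw [if_pos hi, if_pos ((h i).mp hi)]; exact ih2 _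
        · rw [if_neg hi, if_neg (fun hb => hi ((h i).mpr hb))]; exact ih2 _

-- ===== VERDICT (by name: the statement is the Claim_ definition above) =====
theorem part1_spec : Claim_equal_part1 := by
  intro file _
  unfold Spec_part1
  show part1 file = part1_alt file
  have hA : part1 file = file.foldl (fun safe_count food =>
      food.1.foldl (fun safe_count ingredient =>
        if ingredient ∈ ((get_names file).values.foldl (fun strings entry =>
            entry.foldl (fun strings str1 => strings ++ [str1]) strings) []) then safe_count
        else safe_count + 1) safe_count) 0 := rfl
  have hB : part1_alt file = file.foldl (fun safe_count food =>
      food.1.foldl (fun safe_count ingredient =>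
        if ingredient ∈ ((possibleOf file).values.foldl (fun bad entry =>
            PySem.Set.update bad entry) PySem.Set.empty) then safe_count
        else safe_count + 1) safe_count) 0 := rfl
  rw [hA, hB]
  apply count_congr
  intro x
  rw [mem_strings, mem_bad]
  have hv : (possibleOf file).values =
      (possibleOf file).keys.map (fun k => (possibleOf file).getD k []) :=
    PySem.Dict.values_eq_map_keys _ (nodup_keys_possibleOf file) []
  constructor
  · rintro ⟨a, ha, hx⟩
    refine Or.inr ⟨(possibleOf file).getD a [], ?_, ?_⟩
    · rw [hv]
      exact List.mem_map.mpr ⟨a,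
        (mem_keys_possibleOf file a).mpr ((mem_allergensOf file a).mp ha), rfl⟩
    · rw [possible_getD]; exact hx
  · rintro (h | ⟨e, he, hx⟩)
    · simp [PySem.Set.empty] at h
    · rw [hv] at he
      obtain ⟨k, hk, rfl⟩ := List.mem_map.mp he
      exact ⟨k, (mem_allergensOf file k).mpr ((mem_keys_possibleOf file k).mp hk),
        by rwa [possible_getD] at hx⟩
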